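-- pv_equiv track=rewrite | github.com/ThiagoasSilva/7SI-IA | A03_modelagem-de-problemas_040326/exercicio02/Exercicio02.py | gerar_estados
-- ===== SOURCE A (Python) =====
-- from itertools import product
--
-- monitores = ["M1", "M2", "M3"]
--
-- labs      = ["Lab1", "Lab2"]
--
-- horarios  = ["14h", "16h"]
--
-- def valido(estado):
--     ocupacao = {}
--     for monitor, (sala, horario) in estado.items():
--
--         if monitor == "M1" and horario == "16h":
--             return False
--
--         if monitor == "M3" and sala != "Lab2":
--             return False
--
--         chave = (sala, horario)
--         if chave in ocupacao:
--             return False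
--         ocupacao[chave] = monitor
--     return True
--
-- def gerar_estados(estado):
--     novos_estados = []
--
--
--     nao_alocados = [m for m in monitores if m not in estado]
--     if not nao_alocados:
--         return []
--
--     proximo = nao_alocados[0]
--
--     for sala, horario in product(labs, horarios):
--         novo_estado = dict(estado)
--         novo_estado[proximo] = (sala, horario)
--
--         if valido(novo_estado):
--             novos_estados.append(novo_estado)
--
--     return novos_estados
-- ===== SOURCE B (Python) =====
-- monitores = ["M1", "M2", "M3"]
-- labs      = ["Lab1", "Lab2"]
-- horarios  = ["14h", "16h"]
--
-- def gerar_estados(estado):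
--     # Validate the incoming state once, collecting occupied (sala, horario) slots.
--     ocupados = set()
--     for monitor, (sala, horario) in estado.items():
--         if monitor == "M1" and horario == "16h":
--             return []
--         if monitor == "M3" and sala != "Lab2":
--             return []
--         if (sala, horario) in ocupados:
--             return []
--         ocupados.add((sala, horario))
--
--     # Next monitor to allocate.
--     proximo = None
--     for m in monitores:
--         if m not in estado:
--             proximo = m
--             break
--     if proximo is None:
--         return []
--
--     # Filter only the new monitor's own options against the occupied set.
--     novos_estados = []
--     for sala in labs:
--         for horario in horarios:
--             if proximo == "M1" and horario == "16h":
--                 continue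
--             if proximo == "M3" and sala != "Lab2":
--                 continue
--             if (sala, horario) in ocupados:
--                 continue
--             novo = dict(estado)
--             novo[proximo] = (sala, horario)
--             novos_estados.append(novo)
--     return novos_estados
-- ===== Notes on version B (the rewrite author's own statement) =====
-- stated objective: alternative
-- what changed: B validates the incoming state once up front (collecting the occupied-slot set in a single pass) and then filters only the next monitor's four candidate slots against that set, instead of A's rebuilding and fully revalidating the whole state for every candidate.
import Mathlib
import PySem

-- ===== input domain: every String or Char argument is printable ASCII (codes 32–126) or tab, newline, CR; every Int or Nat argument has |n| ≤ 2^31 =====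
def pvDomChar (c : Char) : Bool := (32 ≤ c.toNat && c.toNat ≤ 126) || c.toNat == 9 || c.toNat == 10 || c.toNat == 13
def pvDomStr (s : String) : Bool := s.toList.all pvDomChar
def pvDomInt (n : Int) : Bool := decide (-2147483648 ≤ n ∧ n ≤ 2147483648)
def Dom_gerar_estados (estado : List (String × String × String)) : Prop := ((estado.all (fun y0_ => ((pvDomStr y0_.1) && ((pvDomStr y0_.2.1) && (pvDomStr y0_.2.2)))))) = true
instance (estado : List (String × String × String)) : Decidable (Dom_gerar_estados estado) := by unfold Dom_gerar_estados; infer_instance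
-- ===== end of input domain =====

-- B validates the incoming state in one up-front pass (building the occupied-slot set once)
-- and then filters only the next monitor's four candidate slots, instead of A's per-candidate
-- full-state revalidation; objective: simpler/alternative decomposition, same results.

-- ===== PORT A =====
def pvMonitores : List String := ["M1", "M2", "M3"]
def pvLabs : List String := ["Lab1", "Lab2"]
def pvHorarios : List String := ["14h", "16h"]

-- the loop body of A's `valido`, with `ocupacao` as a Python dict
def pvValidoGo (xs : List (String × String × String))
    (ocupacao : PySem.Dict (String × String) String) : Bool :=
  match xs with
  | [] => true
  | (monitor, sala, horario) :: rest =>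
    if monitor == "M1" && horario == "16h" then false
    else if monitor == "M3" && !(sala == "Lab2") then false
    else if ocupacao.contains (sala, horario) then false
    else pvValidoGo rest (ocupacao.insert (sala, horario) monitor)

def pvValido (estado : List (String × String × String)) : Bool :=
  pvValidoGo estado PySem.Dict.empty

def gerar_estados (estado : List (String × String × String)) : List (List (String × String × String)) :=
  let nao_alocados := pvMonitores.filter (fun m => !((PySem.Dict.mk estado).contains m))
  match nao_alocados with
  | [] => []
  | proximo :: _ =>
    (pvLabs.flatMap (fun sala => pvHorarios.map (fun horario => (sala, horario)))).foldl
      (fun novos_estados sh =>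
        let novo_estado := ((PySem.Dict.mk estado).insert proximo sh).items
        if pvValido novo_estado then novos_estados ++ [novo_estado] else novos_estados) []

-- ===== PORT B =====
-- one-pass validation of the incoming state, collecting the occupied slots (a Python set)
def pvScanB (xs : List (String × String × String))
    (ocupados : PySem.Set (String × String)) : Option (PySem.Set (String × String)) :=
  match xs with
  | [] => some ocupados
  | (monitor, sala, horario) :: rest =>
    if monitor == "M1" && horario == "16h" then none
    else if monitor == "M3" && !(sala == "Lab2") then none
    else if PySem.Set.contains ocupados (sala, horario) then none
    else pvScanB rest (PySem.Set.add ocupados (sala, horario))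

def gerar_estados_alt (estado : List (String × String × String)) : List (List (String × String × String)) :=
  match pvScanB estado [] with
  | none => []
  | some ocupados =>
    match pvMonitores.find? (fun m => !((PySem.Dict.mk estado).contains m)) with
    | none => []
    | some proximo =>
      pvLabs.flatMap (fun sala => pvHorarios.filterMap (fun horario =>
        if proximo == "M1" && horario == "16h" then none
        else if proximo == "M3" && !(sala == "Lab2") then none
        else if PySem.Set.contains ocupados (sala, horario) then none
        else some (((PySem.Dict.mk estado).insert proximo (sala, horario)).items)))

-- ===== PRECONDITION & SPEC =====
def Spec_gerar_estados (estado : List (String × String × String)) (out : List (List (String × String × String))) : Prop := out = gerar_estados_alt estado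
instance (estado : List (String × String × String)) (out : List (List (String × String × String))) : Decidable (Spec_gerar_estados estado out) := by unfold Spec_gerar_estados; infer_instance

-- ===== CLAIM (what is proved, stated in full; the proofs are below) =====
def Claim_equal_gerar_estados : Prop := ∀ (estado : List (String × String × String)), Dom_gerar_estados estado → Spec_gerar_estados estado (gerar_estados estado)

-- ===== LEMMAS AND PROOFS =====

-- A's `valido` on `estado + the one new entry` equals B's one-time scan of `estado`
-- followed by the single-entry check of the new candidate.
theorem valido_append (p s h : String) (xs : List (String × String × String))
    (oc : PySem.Dict (String × String) String) (occ : PySem.Set (String × String))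
    (hrel : ∀ k, oc.contains k = true ↔ k ∈ occ) :
    pvValidoGo (xs ++ [(p, s, h)]) oc =
      (match pvScanB xs occ with
       | none => false
       | some o => !(p == "M1" && h == "16h") && !(p == "M3" && !(s == "Lab2"))
                   && !(PySem.Set.contains o (s, h))) := by
  induction xs generalizing oc occ with
  | nil =>
    simp only [List.nil_append, pvValidoGo, pvScanB]
    by_cases hc1 : (p == "M1" && h == "16h") = true
    · rw [if_pos hc1]; simp [hc1]
    · rw [if_neg hc1]
      by_cases hc2 : (p == "M3" && !(s == "Lab2")) = true
      · rw [if_pos hc2]; simp [hc1, hc2]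
      · rw [if_neg hc2]
        by_cases hm : (s, h) ∈ occ
        · rw [if_pos ((hrel _).2 hm)]
          have h2 : PySem.Set.contains occ (s, h) = true :=
            (PySem.Set.contains_iff occ _).2 hm
          simp [hc1, hc2]
          exact hm
        · have hb : oc.contains (s, h) ≠ true := fun hb => hm ((hrel _).1 hb)
          rw [if_neg hb]
          have h2 : PySem.Set.contains occ (s, h) = false := by
            cases hb2 : PySem.Set.contains occ (s, h)
            · rfl
            · exact absurd ((PySem.Set.contains_iff occ _).1 hb2) hm
          simp [hc1, hc2]
          exact hm
  | cons e rest ih =>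
    obtain ⟨m, s', h'⟩ := e
    simp only [List.cons_append, pvValidoGo, pvScanB]
    by_cases hc1 : (m == "M1" && h' == "16h") = true
    · rw [if_pos hc1, if_pos hc1]
    · rw [if_neg hc1, if_neg hc1]
      by_cases hc2 : (m == "M3" && !(s' == "Lab2")) = true
      · rw [if_pos hc2, if_pos hc2]
      · rw [if_neg hc2, if_neg hc2]
        by_cases hc3 : (s', h') ∈ occ
        · rw [if_pos ((hrel _).2 hc3), if_pos ((PySem.Set.contains_iff occ _).2 hc3)]
        · have hb : oc.contains (s', h') ≠ true := fun hb => hc3 ((hrel _).1 hb)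
          have hb' : PySem.Set.contains occ (s', h') ≠ true :=
            fun hb => hc3 ((PySem.Set.contains_iff occ _).1 hb)
          rw [if_neg hb, if_neg hb']
          apply ih
          intro k
          rw [PySem.Dict.contains_insert]
          constructor
          · intro hk
            rcases Bool.or_eq_true_iff.1 hk with hk | hk
            · exact (PySem.Set.mem_add _ _ _).2 (Or.inr (by simpa using hk))
            · exact (PySem.Set.mem_add _ _ _).2 (Or.inl ((hrel k).1 hk))
          · intro hk
            rcases (PySem.Set.mem_add _ _ _).1 hk with hk | hk
            · exact Bool.or_eq_true_iff.2 (Or.inr ((hrel k).2 hk))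
            · exact Bool.or_eq_true_iff.2 (Or.inl (by simp [hk]))

-- ===== VERDICT (by name: the statement is the Claim_ definition above) =====
theorem gerar_estados_spec : Claim_equal_gerar_estados := by
  intro estado _
  show gerar_estados estado = gerar_estados_alt estado
  unfold gerar_estados gerar_estados_alt
  have hrel0 : ∀ k : String × String,
      (PySem.Dict.empty (κ := String × String) (ν := String)).contains k = true
        ↔ k ∈ ([] : PySem.Set (String × String)) := by
    intro k; simp
  have hfind : pvMonitores.find? (fun m => !((PySem.Dict.mk estado).contains m))
      = (pvMonitores.filter (fun m => !((PySem.Dict.mk estado).contains m))).head? := by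
    cases hb1 : (PySem.Dict.mk estado).contains "M1" <;>
      cases hb2 : (PySem.Dict.mk estado).contains "M2" <;>
        cases hb3 : (PySem.Dict.mk estado).contains "M3" <;>
          simp [pvMonitores, hb1, hb2, hb3]
  rw [hfind]
  cases hfil : pvMonitores.filter (fun m => !((PySem.Dict.mk estado).contains m)) with
  | nil =>
    simp only [List.head?_nil]
    cases pvScanB estado [] <;> rfl
  | cons p rest =>
    have hmem : p ∈ pvMonitores.filter (fun m => !((PySem.Dict.mk estado).contains m)) := by
      rw [hfil]; exact List.mem_cons_self
    have hp : (PySem.Dict.mk estado).contains p = false := by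
      simpa using List.of_mem_filter hmem
    have hins : ∀ sh : String × String,
        ((PySem.Dict.mk estado).insert p sh).items = estado ++ [(p, sh.1, sh.2)] := by
      intro sh
      rw [PySem.Dict.items_insert_of_not_contains _ _ hp]
    simp only [List.head?_cons]
    cases hscan : pvScanB estado [] with
    | none =>
      have hv : ∀ sh : String × String,
          pvValido (((PySem.Dict.mk estado).insert p sh).items) = false := by
        intro sh
        rw [hins sh]
        unfold pvValido
        rw [valido_append p sh.1 sh.2 estado _ _ hrel0, hscan]
      simp [pvLabs, pvHorarios, List.flatMap, hv]
    | some occ =>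
      have hv : ∀ sh : String × String,
          pvValido (((PySem.Dict.mk estado).insert p sh).items)
            = (!(p == "M1" && sh.2 == "16h") && !(p == "M3" && !(sh.1 == "Lab2"))
               && !(PySem.Set.contains occ (sh.1, sh.2))) := by
        intro sh
        rw [hins sh]
        unfold pvValido
        rw [valido_append p sh.1 sh.2 estado _ _ hrel0, hscan]
      have hpm : p ∈ pvMonitores := List.mem_of_mem_filter hmem
      rcases (by simpa [pvMonitores] using hpm : p = "M1" ∨ p = "M2" ∨ p = "M3")
        with rfl | rfl | rfl <;>
      · by_cases m1 : (("Lab1", "14h") : String × String) ∈ occ <;>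
          by_cases m2 : (("Lab1", "16h") : String × String) ∈ occ <;>
            by_cases m3 : (("Lab2", "14h") : String × String) ∈ occ <;>
              by_cases m4 : (("Lab2", "16h") : String × String) ∈ occ <;>
                simp [pvLabs, pvHorarios, List.flatMap, hv, m1, m2, m3, m4]
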